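-- pv_equiv track=rewrite | github.com/adiraj47/Hackerrank_Codes | ginortS.py | ginsort
-- ===== SOURCE A (Python) =====
-- def ginsort(arr):
--
--     sorted_str = ""
--     lower_str = ""
--     upper_str = ""
--     numerical_str = ""
--     even_numerical_str = ""
--     odd_numerical_str = ""
--     # lower string
--     for char in arr:
--         if 97 <= ord(char) <= 122:
--             lower_str += char
--         elif 65 <= ord(char) <= 90:
--             upper_str += char
--         else:
--             numerical_str += char
--     numerical_str = "".join(sorted(numerical_str))
--     for value in numerical_str:
--         if int(value) % 2 == 0:
--             even_numerical_str += value
--         else: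
--             odd_numerical_str += value
--
--     sorted_str = "".join(sorted(lower_str) + sorted(upper_str)) + odd_numerical_str + even_numerical_str
--
--     return sorted_str
-- ===== SOURCE B (Python) =====
-- def ginsort(arr):
--     def key(c):
--         o = ord(c)
--         if 97 <= o <= 122:
--             g = 0
--         elif 65 <= o <= 90:
--             g = 1
--         else:
--             g = 2 if int(c) % 2 else 3
--         return g * 128 + o
--     return "".join(sorted(arr, key=key))
-- ===== Notes on version B (the rewrite author's own statement) =====
-- stated objective: simpler
-- what changed: Replaced A's three-bucket partition loop, three separate sorts and a second odd/even partition loop with a single keyed sort: one sorted(arr, key=...) where the key packs the group (lower < upper < odd digit < even digit) and the code point into one integer.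
import Mathlib
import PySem

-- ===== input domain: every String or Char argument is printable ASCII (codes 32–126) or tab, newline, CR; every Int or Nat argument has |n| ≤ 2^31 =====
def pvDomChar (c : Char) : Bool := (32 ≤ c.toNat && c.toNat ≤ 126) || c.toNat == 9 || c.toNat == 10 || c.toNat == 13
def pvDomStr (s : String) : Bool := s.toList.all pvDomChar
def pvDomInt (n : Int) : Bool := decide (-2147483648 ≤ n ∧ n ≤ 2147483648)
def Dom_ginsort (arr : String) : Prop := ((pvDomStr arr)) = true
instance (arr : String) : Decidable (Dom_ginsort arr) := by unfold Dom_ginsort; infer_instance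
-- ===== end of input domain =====

-- B replaces A's partition loops and three sorts by ONE keyed sort (objective: simpler).

-- ===== PORT A =====
-- Literal port of A. Python raises ValueError at int(value) for a non-digit, non-letter
-- character; those inputs are excluded by Pre_ginsort, so the `getD 0` default is never
-- reached on admitted inputs.
def ginsort (arr : String) : String :=
  let t := arr.toList.foldl
    (fun (acc : List Char × List Char × List Char) char =>
      if 97 ≤ char.toNat ∧ char.toNat ≤ 122 then (acc.1 ++ [char], acc.2.1, acc.2.2)
      else if 65 ≤ char.toNat ∧ char.toNat ≤ 90 then (acc.1, acc.2.1 ++ [char], acc.2.2)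
      else (acc.1, acc.2.1, acc.2.2 ++ [char])) ([], [], [])
  let numerical := PySem.List.sorted t.2.2 (fun c => c) false
  -- (even_numerical_str, odd_numerical_str)
  let oe := numerical.foldl
    (fun (acc : List Char × List Char) value =>
      if PySem.Int.mod ((PySem.Int.ofStr? (String.ofList [value])).getD 0) 2 = 0
      then (acc.1 ++ [value], acc.2)
      else (acc.1, acc.2 ++ [value])) ([], [])
  String.ofList (PySem.List.sorted t.1 (fun c => c) false
             ++ PySem.List.sorted t.2.1 (fun c => c) false
             ++ oe.2 ++ oe.1)

-- ===== PORT B =====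
-- key(c) = g*128 + ord(c), g ∈ {0:lower, 1:upper, 2:odd digit, 3:even digit};
-- same getD-0 note as in port A (int(c) raises outside Pre_ginsort).
def pyKeyG (c : Char) : Int :=
  let o : Int := c.toNat
  if 97 ≤ o ∧ o ≤ 122 then 0 * 128 + o
  else if 65 ≤ o ∧ o ≤ 90 then 1 * 128 + o
  else (if PySem.Int.mod ((PySem.Int.ofStr? (String.ofList [c])).getD 0) 2 ≠ 0 then 2 else 3) * 128 + o

def ginsort_alt (arr : String) : String :=
  String.ofList (PySem.List.sorted arr.toList pyKeyG false)

-- ===== PRECONDITION & SPEC =====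
-- Pre_ excludes exactly the inputs containing a character that is neither an ASCII letter
-- nor an ASCII digit: on those A raises ValueError at int().
def Pre_ginsort (arr : String) : Prop :=
  arr.toList.all (fun c =>
    decide (97 ≤ c.toNat ∧ c.toNat ≤ 122) || decide (65 ≤ c.toNat ∧ c.toNat ≤ 90)
      || decide (48 ≤ c.toNat ∧ c.toNat ≤ 57)) = true
instance (arr : String) : Decidable (Pre_ginsort arr) := by unfold Pre_ginsort; infer_instance
def pvWitness_ginsort : String := "Sorting1234"

def Spec_ginsort (arr : String) (out : String) : Prop := out = ginsort_alt arr
instance (arr : String) (out : String) : Decidable (Spec_ginsort arr out) := by unfold Spec_ginsort; infer_instance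

-- ===== CLAIM (what is proved, stated in full; the proofs are below) =====
def Claim_equal_ginsort : Prop := ∀ (arr : String), Dom_ginsort arr → Pre_ginsort arr → Spec_ginsort arr (ginsort arr)

-- ===== LEMMAS AND PROOFS =====

-- character-class predicates, matching the ports' branch order
def isLowB (c : Char) : Bool := decide (97 ≤ c.toNat ∧ c.toNat ≤ 122)
def isUppB (c : Char) : Bool := decide (65 ≤ c.toNat ∧ c.toNat ≤ 90)
def isEvB (c : Char) : Bool :=
  decide (PySem.Int.mod ((PySem.Int.ofStr? (String.ofList [c])).getD 0) 2 = 0)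

lemma foldA_partition (L : List Char) (l u n : List Char) :
    L.foldl
      (fun (acc : List Char × List Char × List Char) char =>
        if 97 ≤ char.toNat ∧ char.toNat ≤ 122 then (acc.1 ++ [char], acc.2.1, acc.2.2)
        else if 65 ≤ char.toNat ∧ char.toNat ≤ 90 then (acc.1, acc.2.1 ++ [char], acc.2.2)
        else (acc.1, acc.2.1, acc.2.2 ++ [char])) (l, u, n)
    = (l ++ L.filter isLowB, u ++ L.filter (fun c => !isLowB c && isUppB c),
       n ++ L.filter (fun c => !isLowB c && !isUppB c)) := by
  induction L generalizing l u n with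
  | nil => simp
  | cons c L ih =>
    simp only [List.foldl_cons]
    by_cases h1 : 97 ≤ c.toNat ∧ c.toNat ≤ 122
    · rw [if_pos h1, ih]
      have e1 : isLowB c = true := by simpa [isLowB] using h1
      simp [e1]
    · rw [if_neg h1]
      have e1 : isLowB c = false := by simpa [isLowB] using h1
      by_cases h2 : 65 ≤ c.toNat ∧ c.toNat ≤ 90
      · rw [if_pos h2, ih]
        have e2 : isUppB c = true := by simpa [isUppB] using h2
        simp [e1, e2]
      · rw [if_neg h2, ih]
        have e2 : isUppB c = false := by simpa [isUppB] using h2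
        simp [e1, e2]

lemma foldA_parity (S : List Char) (e o : List Char) :
    S.foldl
      (fun (acc : List Char × List Char) value =>
        if PySem.Int.mod ((PySem.Int.ofStr? (String.ofList [value])).getD 0) 2 = 0
        then (acc.1 ++ [value], acc.2)
        else (acc.1, acc.2 ++ [value])) (e, o)
    = (e ++ S.filter isEvB, o ++ S.filter (fun c => !isEvB c)) := by
  induction S generalizing e o with
  | nil => simp
  | cons c S ih =>
    simp only [List.foldl_cons]
    by_cases h : PySem.Int.mod ((PySem.Int.ofStr? (String.ofList [c])).getD 0) 2 = 0
    · rw [if_pos h, ih]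
      have e1 : isEvB c = true := by simpa [isEvB] using h
      simp [e1]
    · rw [if_neg h, ih]
      have e1 : isEvB c = false := by simpa [isEvB] using h
      simp [e1]

lemma char_toNat_inj {a b : Char} (h : a.toNat = b.toNat) : a = b := by
  apply Char.ext
  exact UInt32.toNat_inj.mp h

-- key values by class
lemma key_low {c : Char} (h : isLowB c = true) : pyKeyG c = (c.toNat : Int) := by
  simp only [isLowB, decide_eq_true_eq] at h
  simp [pyKeyG]
  split_ifs <;> omega
lemma key_upp {c : Char} (h : isUppB c = true) (h' : isLowB c = false) :
    pyKeyG c = 128 + (c.toNat : Int) := by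
  simp only [isLowB, decide_eq_false_iff_not] at h'
  simp only [isUppB, decide_eq_true_eq] at h
  simp [pyKeyG]
  split_ifs <;> omega
lemma key_odd {c : Char} (hl : isLowB c = false) (hu : isUppB c = false)
    (he : isEvB c = false) : pyKeyG c = 256 + (c.toNat : Int) := by
  simp only [isLowB, decide_eq_false_iff_not] at hl
  simp only [isUppB, decide_eq_false_iff_not] at hu
  simp only [isEvB, decide_eq_false_iff_not] at he
  simp [pyKeyG, PySem.Int.mod] at he ⊢
  split_ifs <;> simp_all
lemma key_even {c : Char} (hl : isLowB c = false) (hu : isUppB c = false)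
    (he : isEvB c = true) : pyKeyG c = 384 + (c.toNat : Int) := by
  simp only [isLowB, decide_eq_false_iff_not] at hl
  simp only [isUppB, decide_eq_false_iff_not] at hu
  simp only [isEvB, decide_eq_true_eq] at he
  simp [pyKeyG, PySem.Int.mod] at he ⊢
  split_ifs <;> simp_all

-- uniqueness of a key-sorted permutation under key injectivity on the list's elements
lemma perm_pairwise_eq :
    ∀ (l1 l2 : List Char), l1.Perm l2 →
      l1.Pairwise (fun a b => pyKeyG a ≤ pyKeyG b) →
      l2.Pairwise (fun a b => pyKeyG a ≤ pyKeyG b) →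
      (∀ a ∈ l1, ∀ b ∈ l1, pyKeyG a = pyKeyG b → a = b) → l1 = l2 := by
  intro l1
  induction l1 with
  | nil => intro l2 hp _ _ _; simpa using hp.symm.eq_nil
  | cons a t1 ih =>
    intro l2 hp h1 h2 hinj
    cases l2 with
    | nil => exact absurd hp.eq_nil (by simp)
    | cons b t2 =>
      have hab : a = b := by
        have hamem : a ∈ b :: t2 := hp.mem_iff.mp (by simp)
        have hbmem : b ∈ a :: t1 := hp.symm.mem_iff.mp (by simp)
        rcases List.mem_cons.mp hamem with h | h
        · exact h
        · rcases List.mem_cons.mp hbmem with h' | h'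
          · exact h'.symm
          · have k1 : pyKeyG a ≤ pyKeyG b := (List.pairwise_cons.mp h1).1 b h'
            have k2 : pyKeyG b ≤ pyKeyG a := (List.pairwise_cons.mp h2).1 a h
            exact hinj a (by simp) b (by simp [h']) (le_antisymm k1 k2)
      subst hab
      have hp' : t1.Perm t2 := hp.cons_inv
      have := ih t2 hp' (List.pairwise_cons.mp h1).2 (List.pairwise_cons.mp h2).2
        (fun x hx y hy => hinj x (by simp [hx]) y (by simp [hy]))
      rw [this]

-- ===== main proof =====
lemma char_le_toNat {a b : Char} (h : a ≤ b) : a.toNat ≤ b.toNat := Fin.mk_le_mk.mp h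

theorem ginsort_main (arr : String) (hpre : Pre_ginsort arr) :
    ginsort arr = ginsort_alt arr := by
  unfold Pre_ginsort at hpre
  rw [List.all_eq_true] at hpre
  set L := arr.toList with hL
  have hclass : ∀ c ∈ L, isLowB c = true ∨ isUppB c = true ∨ (48 ≤ c.toNat ∧ c.toNat ≤ 57) := by
    intro c hc
    have := hpre c hc
    simp only [Bool.or_eq_true, decide_eq_true_eq] at this
    rcases this with (h | h) | h
    · exact Or.inl (by simp [isLowB, h])
    · exact Or.inr (Or.inl (by simp [isUppB, h]))
    · exact Or.inr (Or.inr h)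
  -- the four key-and-range possibilities for a character of the input
  have keyinfo : ∀ c ∈ L,
      (pyKeyG c = (c.toNat : Int) ∧ 97 ≤ c.toNat ∧ c.toNat ≤ 122) ∨
      (pyKeyG c = 128 + (c.toNat : Int) ∧ 65 ≤ c.toNat ∧ c.toNat ≤ 90) ∨
      (pyKeyG c = 256 + (c.toNat : Int) ∧ 48 ≤ c.toNat ∧ c.toNat ≤ 57) ∨
      (pyKeyG c = 384 + (c.toNat : Int) ∧ 48 ≤ c.toNat ∧ c.toNat ≤ 57) := by
    intro c hc
    rcases hclass c hc with h | h | h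
    · have hb : 97 ≤ c.toNat ∧ c.toNat ≤ 122 := by simpa [isLowB] using h
      exact Or.inl ⟨key_low h, hb⟩
    · have hb : 65 ≤ c.toNat ∧ c.toNat ≤ 90 := by simpa [isUppB] using h
      have hl : isLowB c = false := by simp [isLowB]; omega
      exact Or.inr (Or.inl ⟨key_upp h hl, hb⟩)
    · have hl : isLowB c = false := by simp [isLowB]; omega
      have hu : isUppB c = false := by simp [isUppB]; omega
      cases he : isEvB c with
      | false => exact Or.inr (Or.inr (Or.inl ⟨key_odd hl hu he, h⟩))
      | true => exact Or.inr (Or.inr (Or.inr ⟨key_even hl hu he, h⟩))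
  have hinj : ∀ a ∈ L, ∀ b ∈ L, pyKeyG a = pyKeyG b → a = b := by
    intro a ha b hb h
    rcases keyinfo a ha with ⟨e1, r1⟩ | ⟨e1, r1⟩ | ⟨e1, r1⟩ | ⟨e1, r1⟩ <;>
      rcases keyinfo b hb with ⟨e2, r2⟩ | ⟨e2, r2⟩ | ⟨e2, r2⟩ | ⟨e2, r2⟩ <;>
      (apply char_toNat_inj; rw [e1, e2] at h; omega)
  unfold ginsort ginsort_alt
  simp only [foldA_partition, foldA_parity, List.nil_append]
  congr 1
  set Lo := L.filter isLowB with hLo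
  set Up := L.filter (fun c => !isLowB c && isUppB c) with hUp
  set Nu := L.filter (fun c => !isLowB c && !isUppB c) with hNu
  set S := PySem.List.sorted Nu (fun c => c) false with hS
  set SL := PySem.List.sorted Lo (fun c => c) false with hSL
  set SU := PySem.List.sorted Up (fun c => c) false with hSU
  set Od := S.filter (fun c => !isEvB c) with hOd
  set Ev := S.filter isEvB with hEv
  -- memberships and key formulas for each block
  have memSL : ∀ c ∈ SL, c ∈ L ∧ pyKeyG c = (c.toNat : Int) ∧ 97 ≤ c.toNat ∧ c.toNat ≤ 122 := by
    intro c hc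
    have h := List.mem_filter.mp ((PySem.List.mem_sorted _ _ _ _).mp hc)
    have hb : 97 ≤ c.toNat ∧ c.toNat ≤ 122 := by simpa [isLowB] using h.2
    exact ⟨h.1, key_low h.2, hb⟩
  have memSU : ∀ c ∈ SU, c ∈ L ∧ pyKeyG c = 128 + (c.toNat : Int) ∧ 65 ≤ c.toNat ∧ c.toNat ≤ 90 := by
    intro c hc
    have h := List.mem_filter.mp ((PySem.List.mem_sorted _ _ _ _).mp hc)
    have h2 := h.2
    simp only [Bool.and_eq_true, Bool.not_eq_eq_eq_not, Bool.not_true] at h2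
    have hb : 65 ≤ c.toNat ∧ c.toNat ≤ 90 := by simpa [isUppB] using h2.2
    exact ⟨h.1, key_upp h2.2 h2.1, hb⟩
  have memS : ∀ c ∈ S, c ∈ L ∧ isLowB c = false ∧ isUppB c = false ∧ 48 ≤ c.toNat ∧ c.toNat ≤ 57 := by
    intro c hc
    have h := List.mem_filter.mp ((PySem.List.mem_sorted _ _ _ _).mp hc)
    have h2 := h.2
    simp only [Bool.and_eq_true, Bool.not_eq_eq_eq_not, Bool.not_true] at h2
    refine ⟨h.1, h2.1, h2.2, ?_⟩
    rcases hclass c h.1 with hx | hx | hx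
    · rw [h2.1] at hx; cases hx
    · rw [h2.2] at hx; cases hx
    · exact hx
  have memOd : ∀ c ∈ Od, c ∈ L ∧ pyKeyG c = 256 + (c.toNat : Int) ∧ 48 ≤ c.toNat ∧ c.toNat ≤ 57 := by
    intro c hc
    have h := List.mem_filter.mp hc
    rcases memS c h.1 with ⟨hcl, hl, hu, hb⟩
    have he : isEvB c = false := by simpa using h.2
    exact ⟨hcl, key_odd hl hu he, hb⟩
  have memEv : ∀ c ∈ Ev, c ∈ L ∧ pyKeyG c = 384 + (c.toNat : Int) ∧ 48 ≤ c.toNat ∧ c.toNat ≤ 57 := by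
    intro c hc
    have h := List.mem_filter.mp hc
    rcases memS c h.1 with ⟨hcl, hl, hu, hb⟩
    exact ⟨hcl, key_even hl hu h.2, hb⟩
  -- the left-hand side is a permutation of L
  have pOdEv : (Od ++ Ev).Perm S := by
    have := List.filter_append_perm (fun c => !isEvB c) S
    simpa [Bool.not_not] using this
  have pUpNu : (Up ++ Nu).Perm (L.filter (fun c => !isLowB c)) := by
    have h := List.filter_append_perm isUppB (L.filter (fun c => !isLowB c))
    rw [List.filter_filter, List.filter_filter] at h
    have e1 : (fun a => isUppB a && !isLowB a) = fun c => !isLowB c && isUppB c := by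
      funext c; rw [Bool.and_comm]
    have e2 : (fun a => !isUppB a && !isLowB a) = fun c => !isLowB c && !isUppB c := by
      funext c; rw [Bool.and_comm]
    rw [e1, e2] at h
    exact h
  have pLoUpNu : (Lo ++ (Up ++ Nu)).Perm L := by
    have h1 := List.filter_append_perm isLowB L
    exact ((List.Perm.refl Lo).append pUpNu).trans h1
  have pLHS : (SL ++ SU ++ Od ++ Ev).Perm L := by
    have h : (SL ++ (SU ++ (Od ++ Ev))).Perm (Lo ++ (Up ++ Nu)) :=
      (PySem.List.sorted_perm _ _ _).append
        ((PySem.List.sorted_perm _ _ _).append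
          (pOdEv.trans (PySem.List.sorted_perm _ _ _)))
    have := h.trans pLoUpNu
    simpa [List.append_assoc] using this
  -- the left-hand side is pairwise increasing under pyKeyG
  have pwSL : SL.Pairwise (fun a b => pyKeyG a ≤ pyKeyG b) := by
    refine (PySem.List.sorted_pairwise Lo (fun c => c) ).imp_of_mem ?_
    intro a b ha hb hab
    rcases memSL a ha with ⟨_, e1, r1⟩
    rcases memSL b hb with ⟨_, e2, r2⟩
    have := char_le_toNat hab
    rw [e1, e2]; omega
  have pwSU : SU.Pairwise (fun a b => pyKeyG a ≤ pyKeyG b) := by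
    refine (PySem.List.sorted_pairwise Up (fun c => c) ).imp_of_mem ?_
    intro a b ha hb hab
    rcases memSU a ha with ⟨_, e1, r1⟩
    rcases memSU b hb with ⟨_, e2, r2⟩
    have := char_le_toNat hab
    rw [e1, e2]; omega
  have pwS : S.Pairwise (fun a b => (a : Char) ≤ b) := PySem.List.sorted_pairwise Nu (fun c => c)
  have pwOd : Od.Pairwise (fun a b => pyKeyG a ≤ pyKeyG b) := by
    refine ((pwS.sublist List.filter_sublist)).imp_of_mem ?_
    intro a b ha hb hab
    rcases memOd a ha with ⟨_, e1, r1⟩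
    rcases memOd b hb with ⟨_, e2, r2⟩
    have := char_le_toNat hab
    rw [e1, e2]; omega
  have pwEv : Ev.Pairwise (fun a b => pyKeyG a ≤ pyKeyG b) := by
    refine ((pwS.sublist List.filter_sublist)).imp_of_mem ?_
    intro a b ha hb hab
    rcases memEv a ha with ⟨_, e1, r1⟩
    rcases memEv b hb with ⟨_, e2, r2⟩
    have := char_le_toNat hab
    rw [e1, e2]; omega
  have pwLHS : (SL ++ SU ++ Od ++ Ev).Pairwise (fun a b => pyKeyG a ≤ pyKeyG b) := by
    rw [List.pairwise_append, List.pairwise_append, List.pairwise_append]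
    refine ⟨⟨⟨pwSL, pwSU, ?_⟩, pwOd, ?_⟩, pwEv, ?_⟩
    · intro a ha b hb
      rcases memSL a ha with ⟨_, e1, r1⟩
      rcases memSU b hb with ⟨_, e2, r2⟩
      rw [e1, e2]; omega
    · intro a ha b hb
      rcases memOd b hb with ⟨_, e2, r2⟩
      rcases List.mem_append.mp ha with h | h
      · rcases memSL a h with ⟨_, e1, r1⟩
        rw [e1, e2]; omega
      · rcases memSU a h with ⟨_, e1, r1⟩
        rw [e1, e2]; omega
    · intro a ha b hb
      rcases memEv b hb with ⟨_, e2, r2⟩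
      rcases List.mem_append.mp ha with h | h
      · rcases List.mem_append.mp h with h' | h'
        · rcases memSL a h' with ⟨_, e1, r1⟩
          rw [e1, e2]; omega
        · rcases memSU a h' with ⟨_, e1, r1⟩
          rw [e1, e2]; omega
      · rcases memOd a h with ⟨_, e1, r1⟩
        rw [e1, e2]; omega
  -- conclude: both sides are key-sorted permutations of L, and pyKeyG is injective on L
  have pRHS := PySem.List.sorted_perm L pyKeyG false
  have pwRHS : (PySem.List.sorted L pyKeyG false).Pairwise (fun a b => pyKeyG a ≤ pyKeyG b) :=
    PySem.List.sorted_pairwise L pyKeyG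
  refine perm_pairwise_eq _ _ (pLHS.trans pRHS.symm) pwLHS pwRHS ?_
  intro a ha b hb
  exact hinj a (pLHS.subset ha) b (pLHS.subset hb)

-- ===== VERDICT (by name: the statement is the Claim_ definition above) =====
theorem ginsort_spec : Claim_equal_ginsort := by
  intro arr _ hpre
  unfold Spec_ginsort
  exact ginsort_main arr hpre
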